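-- pv_equiv track=rewrite | github.com/monizyzz/University | 2-year/Algorithmic Laboratory II/Graph_algorithms/cidade.py | build
-- ===== SOURCE A (Python) =====
-- def build(arestas):
--     adj = {}
--
--     for o,d,p in arestas:
--         if o != d:
--             if o not in adj:
--                 adj[o] = {}
--             if d not in adj:
--                 adj[d] = {}
--
--             if d not in adj[o].keys() or adj[o][d] > p:
--                 adj[o][d] = p
--                 adj[d][o] = p
--
--     return adj
-- ===== SOURCE B (Python) =====
-- def build(arestas):
--     # Two-phase: collect the nodes in first-appearance order, then build each
--     # node's row by an independent scan over the (self-loop-free) edge list.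
--     edges = [e for e in arestas if e[0] != e[1]]
--
--     nodes = []
--     for o, d, _ in edges:
--         if o not in nodes:
--             nodes.append(o)
--         if d not in nodes:
--             nodes.append(d)
--
--     def row(x):
--         out = {}
--         for o, d, p in edges:
--             if o == x:
--                 y = d
--             elif d == x:
--                 y = o
--             else:
--                 continue
--             if y not in out or p < out[y]:
--                 out[y] = p
--         return out
--
--     return {x: row(x) for x in nodes}
-- ===== Notes on version B (the rewrite author's own statement) =====
-- stated objective: alternative
-- what changed: Replaces A's single-pass incremental symmetric dict-merge by a two-phase build: first collect the nodes in first-appearance order from the self-loop-free edge list, then construct each node's adjacency row by an independent min-keeping scan over the edges.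
import Mathlib
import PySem

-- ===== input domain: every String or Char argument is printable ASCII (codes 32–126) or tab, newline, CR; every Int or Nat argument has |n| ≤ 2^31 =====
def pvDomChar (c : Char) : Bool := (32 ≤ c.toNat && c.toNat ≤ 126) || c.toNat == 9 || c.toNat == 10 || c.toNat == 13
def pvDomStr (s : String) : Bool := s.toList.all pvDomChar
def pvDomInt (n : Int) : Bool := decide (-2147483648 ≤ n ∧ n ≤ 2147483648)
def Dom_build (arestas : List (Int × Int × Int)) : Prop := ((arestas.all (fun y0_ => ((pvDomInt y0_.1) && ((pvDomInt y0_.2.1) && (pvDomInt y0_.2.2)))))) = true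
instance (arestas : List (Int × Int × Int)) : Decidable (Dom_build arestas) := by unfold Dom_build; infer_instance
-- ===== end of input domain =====

-- B replaces A's incremental symmetric dict-merge by a two-phase build
-- (collect nodes, then scan the edges once per node to build its row);
-- same return value, different decomposition (objective: alternative).

-- ===== PORT A =====
-- one iteration of A's loop over `arestas`
def buildStepA (adj : PySem.Dict Int (PySem.Dict Int Int)) (e : Int × Int × Int) :
    PySem.Dict Int (PySem.Dict Int Int) :=
  let o := e.1; let d := e.2.1; let p := e.2.2
  if o ≠ d then
    let adj1 := if adj.contains o then adj else adj.insert o PySem.Dict.empty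
    let adj2 := if adj1.contains d then adj1 else adj1.insert d PySem.Dict.empty
    if (adj2.getD o PySem.Dict.empty).contains d = false
        ∨ p < (adj2.getD o PySem.Dict.empty).getD d 0 then
      let adj3 := adj2.insert o ((adj2.getD o PySem.Dict.empty).insert d p)
      adj3.insert d ((adj3.getD d PySem.Dict.empty).insert o p)
    else adj2
  else adj

def build (arestas : List (Int × Int × Int)) : List (Int × List (Int × Int)) :=
  ((arestas.foldl buildStepA PySem.Dict.empty).items).map (fun kv => (kv.1, kv.2.items))

-- ===== PORT B =====
-- `if x not in nodes: nodes.append(x)`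
def addNode (ns : List Int) (x : Int) : List Int := if x ∈ ns then ns else ns ++ [x]

-- one iteration of `row`'s loop over `edges`
def rowStep (x : Int) (out : PySem.Dict Int Int) (e : Int × Int × Int) : PySem.Dict Int Int :=
  let y? : Option Int :=
    if e.1 = x then some e.2.1 else if e.2.1 = x then some e.1 else none
  match y? with
  | none => out
  | some y =>
      if out.contains y = false ∨ e.2.2 < out.getD y 0 then out.insert y e.2.2 else out

def buildRow (edges : List (Int × Int × Int)) (x : Int) : PySem.Dict Int Int :=
  edges.foldl (rowStep x) PySem.Dict.empty

def build_alt (arestas : List (Int × Int × Int)) : List (Int × List (Int × Int)) :=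
  let edges := arestas.filter (fun e => e.1 ≠ e.2.1)
  let nodes := edges.foldl (fun ns e => addNode (addNode ns e.1) e.2.1) ([] : List Int)
  nodes.map (fun x => (x, (buildRow edges x).items))

-- ===== PRECONDITION & SPEC =====
def Spec_build (arestas : List (Int × Int × Int)) (out : List (Int × List (Int × Int))) : Prop := out = build_alt arestas
instance (arestas : List (Int × Int × Int)) (out : List (Int × List (Int × Int))) : Decidable (Spec_build arestas out) := by unfold Spec_build; infer_instance

-- ===== CLAIM (what is proved, stated in full; the proofs are below) =====
def Claim_equal_build : Prop := ∀ (arestas : List (Int × Int × Int)), Dom_build arestas → Spec_build arestas (build arestas)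

-- ===== LEMMAS AND PROOFS =====

-- symmetry invariant of A's adjacency dict
def SymAdj (adj : PySem.Dict Int (PySem.Dict Int Int)) : Prop :=
  ∀ x y : Int,
    ((adj.getD x PySem.Dict.empty).get? y) = ((adj.getD y PySem.Dict.empty).get? x)

lemma sym_empty : SymAdj PySem.Dict.empty := by
  intro x y; simp [PySem.Dict.getD_empty, PySem.Dict.get?_empty]

lemma condInsert_getD (adj : PySem.Dict Int (PySem.Dict Int Int)) (k z : Int) :
    ((if adj.contains k then adj else adj.insert k PySem.Dict.empty).getD z PySem.Dict.empty)
      = adj.getD z PySem.Dict.empty := by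
  split
  · rfl
  · next hk =>
    rw [PySem.Dict.getD_insert]
    split
    · next hz =>
      subst hz
      exact (PySem.Dict.getD_of_not_contains _ _ (by simpa using hk)).symm
    · rfl

lemma cond_swap (adj : PySem.Dict Int (PySem.Dict Int Int)) (hs : SymAdj adj) (o d p : Int) :
    (((adj.getD o PySem.Dict.empty).contains d = false
        ∨ p < (adj.getD o PySem.Dict.empty).getD d 0)
      ↔ ((adj.getD d PySem.Dict.empty).contains o = false
        ∨ p < (adj.getD d PySem.Dict.empty).getD o 0)) := by
  rw [PySem.Dict.contains_eq_isSome_get? (adj.getD o PySem.Dict.empty) d,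
      PySem.Dict.contains_eq_isSome_get? (adj.getD d PySem.Dict.empty) o,
      PySem.Dict.getD_eq_get?_getD (adj.getD o PySem.Dict.empty) d 0,
      PySem.Dict.getD_eq_get?_getD (adj.getD d PySem.Dict.empty) o 0, hs o d]

-- explicit form of one A-step, seen from the row of x
lemma stepA_getD_core (adj : PySem.Dict Int (PySem.Dict Int Int)) (o d p x : Int)
    (h : ¬ o = d) :
    (buildStepA adj (o, d, p)).getD x PySem.Dict.empty =
      if ((adj.getD o PySem.Dict.empty).contains d = false
          ∨ p < (adj.getD o PySem.Dict.empty).getD d 0) then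
        (if x = d then (adj.getD d PySem.Dict.empty).insert o p
         else if x = o then (adj.getD o PySem.Dict.empty).insert d p
         else adj.getD x PySem.Dict.empty)
      else adj.getD x PySem.Dict.empty := by
  unfold buildStepA
  rw [if_pos h]
  simp only [condInsert_getD]
  by_cases hC : ((adj.getD o PySem.Dict.empty).contains d = false
      ∨ p < (adj.getD o PySem.Dict.empty).getD d 0)
  · rw [if_pos hC, if_pos hC]
    simp only [PySem.Dict.getD_insert, condInsert_getD]
    split_ifs <;> first | rfl | omega
  · rw [if_neg hC, if_neg hC]
    simp only [condInsert_getD]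

-- the row of x after one A-step is B's row step applied to the row of x
lemma stepA_getD (adj : PySem.Dict Int (PySem.Dict Int Int)) (hs : SymAdj adj)
    (e : Int × Int × Int) (x : Int) :
    (buildStepA adj e).getD x PySem.Dict.empty =
      if e.1 = e.2.1 then adj.getD x PySem.Dict.empty
      else rowStep x (adj.getD x PySem.Dict.empty) e := by
  obtain ⟨o, d, p⟩ := e
  by_cases h : o = d
  · rw [if_pos h]
    subst h
    unfold buildStepA
    rw [if_neg (by simp)]
  · rw [if_neg h]
    rw [stepA_getD_core adj o d p x h]
    unfold rowStep
    by_cases hxo : o = x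
    · subst hxo
      simp only [if_true]
      show (if ((adj.getD o PySem.Dict.empty).contains d = false
              ∨ p < (adj.getD o PySem.Dict.empty).getD d 0) then
              if o = d then (adj.getD d PySem.Dict.empty).insert o p
              else (adj.getD o PySem.Dict.empty).insert d p
            else adj.getD o PySem.Dict.empty) =
           (if ((adj.getD o PySem.Dict.empty).contains d = false
              ∨ p < (adj.getD o PySem.Dict.empty).getD d 0) then
              (adj.getD o PySem.Dict.empty).insert d p
            else adj.getD o PySem.Dict.empty)
      split_ifs <;> simp_all
    · by_cases hxd : d = x
      · subst hxd
        simp only [if_neg hxo, if_true]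
        show (if ((adj.getD o PySem.Dict.empty).contains d = false
                ∨ p < (adj.getD o PySem.Dict.empty).getD d 0) then
                (adj.getD d PySem.Dict.empty).insert o p
              else adj.getD d PySem.Dict.empty) =
             (if ((adj.getD d PySem.Dict.empty).contains o = false
                ∨ p < (adj.getD d PySem.Dict.empty).getD o 0) then
                (adj.getD d PySem.Dict.empty).insert o p
              else adj.getD d PySem.Dict.empty)
        simp only [cond_swap adj hs o d p]
      · simp only [if_neg hxo, if_neg hxd]
        show (if ((adj.getD o PySem.Dict.empty).contains d = false
                ∨ p < (adj.getD o PySem.Dict.empty).getD d 0) then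
                if x = d then (adj.getD d PySem.Dict.empty).insert o p
                else if x = o then (adj.getD o PySem.Dict.empty).insert d p
                else adj.getD x PySem.Dict.empty
              else adj.getD x PySem.Dict.empty) =
             adj.getD x PySem.Dict.empty
        split_ifs <;> simp_all

-- get? formula for one B row step
lemma rowStep_get? (row : PySem.Dict Int Int) (o d p x y : Int) (h : ¬ o = d) :
    (rowStep x row (o, d, p)).get? y =
      if x = o ∧ y = d then
        (if row.contains d = false ∨ p < row.getD d 0 then some p else row.get? d)
      else if x = d ∧ y = o then
        (if row.contains o = false ∨ p < row.getD o 0 then some p else row.get? o)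
      else row.get? y := by
  unfold rowStep
  by_cases hxo : o = x <;> by_cases hxd : d = x <;> by_cases hyd : y = d <;> by_cases hyo : y = o <;>
    simp_all <;>
      first
        | (split_ifs <;> simp_all [PySem.Dict.get?_insert])
        | (intro h1 h2; exact absurd h1.symm (by assumption))

lemma stepA_sym (adj : PySem.Dict Int (PySem.Dict Int Int)) (hs : SymAdj adj)
    (e : Int × Int × Int) : SymAdj (buildStepA adj e) := by
  intro x y
  rw [stepA_getD adj hs e x, stepA_getD adj hs e y]
  by_cases h : e.1 = e.2.1
  · rw [if_pos h, if_pos h]; exact hs x y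
  · rw [if_neg h, if_neg h]
    obtain ⟨o, d, p⟩ := e
    simp only at h
    rw [rowStep_get? (adj.getD x PySem.Dict.empty) o d p x y h,
        rowStep_get? (adj.getD y PySem.Dict.empty) o d p y x h]
    have hcs := cond_swap adj hs o d p
    by_cases hxo : x = o <;> by_cases hxd : x = d <;>
      by_cases hyo : y = o <;> by_cases hyd : y = d <;>
        simp_all [hs x y, hs o d, hs x o, hs x d, hs o y, hs d y]

-- keys after one A-step
lemma keys_after_update (A : PySem.Dict Int (PySem.Dict Int Int)) (o d : Int)
    (V W : PySem.Dict Int Int) (ho : A.contains o = true) (hd : A.contains d = true) :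
    ((A.insert o V).insert d W).keys = A.keys := by
  rw [PySem.Dict.keys_insert_of_contains _ _ (by rw [PySem.Dict.contains_insert]; simp [hd]),
      PySem.Dict.keys_insert_of_contains _ _ ho]

-- keys after one A-step
lemma stepA_keys_core (adj : PySem.Dict Int (PySem.Dict Int Int)) (o d p : Int)
    (h : ¬ o = d) :
    (buildStepA adj (o, d, p)).keys = addNode (addNode adj.keys o) d := by
  have hdo : (d == o) = false := by simp; exact fun hh => h hh.symm
  unfold buildStepA
  rw [if_pos h]
  cases h1 : adj.contains o with
  | true =>
    simp only [if_true]
    cases h2 : adj.contains d with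
    | true =>
      simp only [if_true]
      have hT : addNode (addNode adj.keys o) d = adj.keys := by
        unfold addNode
        rw [if_pos ((PySem.Dict.contains_iff_mem_keys _ _).mp h1),
            if_pos ((PySem.Dict.contains_iff_mem_keys _ _).mp h2)]
      rw [hT]
      split
      · exact keys_after_update adj o d _ _ h1 h2
      · rfl
    | false =>
      simp only [Bool.false_eq_true, if_false]
      have hT : addNode (addNode adj.keys o) d = adj.keys ++ [d] := by
        unfold addNode
        rw [if_pos ((PySem.Dict.contains_iff_mem_keys _ _).mp h1),
            if_neg (fun hm => by rw [(PySem.Dict.contains_iff_mem_keys _ _).mpr hm] at h2; cases h2)]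
      rw [hT]
      have hk2 : (adj.insert d PySem.Dict.empty).keys = adj.keys ++ [d] :=
        PySem.Dict.keys_insert_of_not_contains _ _ h2
      split
      · rw [keys_after_update _ o d _ _
            (by rw [PySem.Dict.contains_insert]; simp [h1])
            (by rw [PySem.Dict.contains_insert]; simp), hk2]
      · exact hk2
  | false =>
    simp only [Bool.false_eq_true, if_false]
    have hk1 : (adj.insert o PySem.Dict.empty).keys = adj.keys ++ [o] :=
      PySem.Dict.keys_insert_of_not_contains _ _ h1
    simp only [PySem.Dict.contains_insert, hdo, Bool.false_or]
    cases h2 : adj.contains d with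
    | true =>
      simp only [if_true]
      have hmo : ¬ o ∈ adj.keys :=
        fun hm => by rw [(PySem.Dict.contains_iff_mem_keys _ _).mpr hm] at h1; cases h1
      have hT : addNode (addNode adj.keys o) d = adj.keys ++ [o] := by
        unfold addNode
        rw [if_neg hmo,
            if_pos (List.mem_append_left _ ((PySem.Dict.contains_iff_mem_keys _ _).mp h2))]
      rw [hT]
      split
      · rw [keys_after_update _ o d _ _
            (by rw [PySem.Dict.contains_insert]; simp)
            (by rw [PySem.Dict.contains_insert]; simp [h2]), hk1]
      · exact hk1
    | false =>
      simp only [Bool.false_eq_true, if_false]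
      have hnc : ((adj.insert o PySem.Dict.empty).contains d) = false := by
        simp [PySem.Dict.contains_insert, hdo, h2]
      have hk2 : ((adj.insert o PySem.Dict.empty).insert d PySem.Dict.empty).keys
          = adj.keys ++ [o] ++ [d] := by
        rw [PySem.Dict.keys_insert_of_not_contains _ _ hnc, hk1]
      have hmo : ¬ o ∈ adj.keys :=
        fun hm => by rw [(PySem.Dict.contains_iff_mem_keys _ _).mpr hm] at h1; cases h1
      have hmd : ¬ d ∈ adj.keys ++ [o] := fun hm => by
        rcases List.mem_append.mp hm with hm1 | hm2
        · rw [(PySem.Dict.contains_iff_mem_keys _ _).mpr hm1] at h2; cases h2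
        · exact h (List.mem_singleton.mp hm2).symm
      have hT : addNode (addNode adj.keys o) d = adj.keys ++ [o] ++ [d] := by
        unfold addNode
        rw [if_neg hmo, if_neg hmd]
      rw [hT]
      split
      · rw [keys_after_update _ o d _ _
            (by rw [PySem.Dict.contains_insert, PySem.Dict.contains_insert]; simp)
            (by rw [PySem.Dict.contains_insert]; simp), hk2]
      · exact hk2

lemma stepA_keys (adj : PySem.Dict Int (PySem.Dict Int Int)) (e : Int × Int × Int) :
    (buildStepA adj e).keys =
      if e.1 = e.2.1 then adj.keys else addNode (addNode adj.keys e.1) e.2.1 := by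
  by_cases h : e.1 = e.2.1
  · rw [if_pos h]
    unfold buildStepA
    rw [if_neg (not_not_intro h)]
  · rw [if_neg h]
    obtain ⟨o, d, p⟩ := e
    exact stepA_keys_core adj o d p h

lemma foldA_getD (L : List (Int × Int × Int)) :
    ∀ adj, SymAdj adj → ∀ x,
      (L.foldl buildStepA adj).getD x PySem.Dict.empty =
        (L.filter (fun e => e.1 ≠ e.2.1)).foldl (rowStep x) (adj.getD x PySem.Dict.empty) := by
  induction L with
  | nil => intro adj _ x; rfl
  | cons e L ih =>
    intro adj hs x
    rw [List.foldl_cons, ih _ (stepA_sym adj hs e), List.filter_cons]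
    by_cases h : e.1 = e.2.1
    · rw [stepA_getD adj hs e x, if_pos h]
      simp [h]
    · rw [stepA_getD adj hs e x, if_neg h]
      simp [h]

lemma foldA_keys (L : List (Int × Int × Int)) :
    ∀ adj,
      (L.foldl buildStepA adj).keys =
        (L.filter (fun e => e.1 ≠ e.2.1)).foldl
          (fun ns e => addNode (addNode ns e.1) e.2.1) adj.keys := by
  induction L with
  | nil => intro adj; rfl
  | cons e L ih =>
    intro adj
    rw [List.foldl_cons, ih _, stepA_keys adj e, List.filter_cons]
    by_cases h : e.1 = e.2.1
    · rw [if_pos h]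
      simp [h]
    · rw [if_neg h]
      simp [h]

lemma addNode_nodup (ns : List Int) (x : Int) (h : ns.Nodup) : (addNode ns x).Nodup := by
  unfold addNode; split
  · exact h
  · next hx =>
    rw [List.nodup_append]
    refine ⟨h, List.nodup_singleton x, ?_⟩
    intro a ha b hb
    simp only [List.mem_singleton] at hb
    subst hb
    exact fun h' => hx (h' ▸ ha)

lemma foldAdd_nodup (M : List (Int × Int × Int)) :
    ∀ ns : List Int, ns.Nodup →
      (M.foldl (fun ns e => addNode (addNode ns e.1) e.2.1) ns).Nodup := by
  induction M with
  | nil => exact fun ns h => h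
  | cons e M ih => exact fun ns h => ih _ (addNode_nodup _ _ (addNode_nodup _ _ h))

-- ===== VERDICT (by name: the statement is the Claim_ definition above) =====
theorem build_spec : Claim_equal_build := by
  intro arestas _
  unfold Spec_build build build_alt
  have hnd : (arestas.foldl buildStepA PySem.Dict.empty).keys.Nodup := by
    rw [foldA_keys arestas PySem.Dict.empty, PySem.Dict.keys_empty]
    exact foldAdd_nodup _ [] List.nodup_nil
  rw [PySem.Dict.items_eq_map_keys _ hnd PySem.Dict.empty, List.map_map,
      foldA_keys arestas PySem.Dict.empty, PySem.Dict.keys_empty]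
  apply List.map_congr_left
  intro x hx
  simp only [Function.comp_apply]
  rw [foldA_getD arestas PySem.Dict.empty sym_empty x, PySem.Dict.getD_empty]
  rfl
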